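-- pv_equiv track=rewrite | github.com/heesuju/SmashUltimateInfoGenerator | src/utils/common.py | trim_redundant_spaces
-- ===== SOURCE A (Python) =====
-- def trim_redundant_spaces(input, split_char = ' '):
--     arr = input.split(split_char)
--     result = ""
--
--     for it in arr:
--         if result:
--             result += " " + it
--         else:
--             result += it
--
--     return result
-- ===== SOURCE B (Python) =====
-- def trim_redundant_spaces(input, split_char = ' '):
--     arr = input.split(split_char)
--     i = 0
--     while i < len(arr) and arr[i] == "":
--         i += 1
--     return " ".join(arr[i:])
-- ===== Notes on version B (the rewrite author's own statement) =====
-- stated objective: simpler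
-- what changed: Replaces A's accumulator loop that tests emptiness at every step with two phases: skip the leading run of empty tokens, then a single space-join of the remaining slice.
-- outside the precondition, e.g. on trim_redundant_spaces('a b', ''): A raises ValueError, B raises ValueError
import Mathlib
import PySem

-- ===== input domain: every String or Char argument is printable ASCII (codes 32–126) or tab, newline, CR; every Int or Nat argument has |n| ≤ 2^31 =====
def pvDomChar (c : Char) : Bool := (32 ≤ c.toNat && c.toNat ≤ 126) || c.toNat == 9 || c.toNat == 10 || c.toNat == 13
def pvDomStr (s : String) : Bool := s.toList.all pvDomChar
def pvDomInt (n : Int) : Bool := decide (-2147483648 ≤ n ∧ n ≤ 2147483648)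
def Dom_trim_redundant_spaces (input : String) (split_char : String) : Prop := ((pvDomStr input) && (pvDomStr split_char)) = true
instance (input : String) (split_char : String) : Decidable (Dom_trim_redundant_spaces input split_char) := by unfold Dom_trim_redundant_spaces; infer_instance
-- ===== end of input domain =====

-- B is a simpler decomposition: skip the leading run of empty tokens, then a single join,
-- instead of A's accumulator loop with an emptiness test at every step.

-- ===== PORT A =====
-- arr = input.split(split_char); accumulate: if result: result += " "+it else result += it
def trim_redundant_spaces (input : String) (split_char : String) : String :=
  let arr := (PySem.Str.split? input split_char).getD []   -- none only for an empty separator, excluded by Pre_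
  arr.foldl (fun result it => if result ≠ "" then result ++ " " ++ it else result ++ it) ""

-- ===== PORT B =====
-- arr = input.split(split_char); skip the leading empty tokens; " ".join of the rest
def trim_redundant_spaces_alt (input : String) (split_char : String) : String :=
  let arr := (PySem.Str.split? input split_char).getD []   -- none only for an empty separator, excluded by Pre_
  PySem.Str.join " " (arr.dropWhile (fun s => s == ""))

-- ===== PRECONDITION & SPEC =====
-- Python's str.split raises ValueError on an empty separator; Pre_ excludes exactly that.
def Pre_trim_redundant_spaces (input : String) (split_char : String) : Prop := split_char ≠ ""
instance (input : String) (split_char : String) : Decidable (Pre_trim_redundant_spaces input split_char) := by unfold Pre_trim_redundant_spaces; infer_instance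
def pvWitness_trim_redundant_spaces : String × String := ("  a  b ", " ")

def Spec_trim_redundant_spaces (input : String) (split_char : String) (out : String) : Prop := out = trim_redundant_spaces_alt input split_char
instance (input : String) (split_char : String) (out : String) : Decidable (Spec_trim_redundant_spaces input split_char out) := by unfold Spec_trim_redundant_spaces; infer_instance

-- ===== CLAIM (what is proved, stated in full; the proofs are below) =====
def Claim_equal_trim_redundant_spaces : Prop := ∀ (input : String) (split_char : String), Dom_trim_redundant_spaces input split_char → Pre_trim_redundant_spaces input split_char → Spec_trim_redundant_spaces input split_char (trim_redundant_spaces input split_char)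

-- ===== LEMMAS AND PROOFS =====

-- pull one piece out of the front of an intercalate (List Char level)
theorem pvJoinL (sep x : List Char) (l : List (List Char)) :
    sep.intercalate (x :: l) = x ++ sep.intercalate ([] :: l) := by
  cases l <;> simp [List.intercalate, List.intersperse]

theorem pvJoinCons (it : String) (rest : List String) :
    PySem.Str.join " " (it :: rest) = it ++ PySem.Str.join " " ("" :: rest) := by
  apply String.toList_inj.mp
  simp [PySem.Str.toList_join, PySem.Chars.join]
  exact pvJoinL _ _ _

theorem pvFoldNonempty (rest : List String) :
    ∀ (r : String), r ≠ "" →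
      rest.foldl (fun result it => if result ≠ "" then result ++ " " ++ it else result ++ it) r
        = r ++ PySem.Str.join " " ("" :: rest) := by
  induction rest with
  | nil =>
      intro r _
      apply String.toList_inj.mp
      simp [PySem.Str.toList_join, PySem.Chars.join, List.intercalate]
  | cons it rest ih =>
      intro r hr
      have hne : r ++ " " ++ it ≠ "" := by
        intro h
        have h2 := congrArg String.toList h
        simp at h2
      simp only [List.foldl_cons, if_pos hr, ih _ hne]
      apply String.toList_inj.mp
      simp [PySem.Str.toList_join, PySem.Chars.join]
      rw [pvJoinL]
      have h2 : [' '].intercalate ([] :: it.toList :: List.map String.toList rest)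
          = [' '] ++ [' '].intercalate (it.toList :: List.map String.toList rest) := by
        simp [List.intercalate, List.intersperse]
      rw [h2, pvJoinL]
      simp
      exact (pvJoinL _ _ _).symm

theorem pvMain (arr : List String) :
    arr.foldl (fun result it => if result ≠ "" then result ++ " " ++ it else result ++ it) ""
      = PySem.Str.join " " (arr.dropWhile (fun s => s == "")) := by
  induction arr with
  | nil =>
      apply String.toList_inj.mp
      simp [PySem.Str.toList_join, PySem.Chars.join, List.intercalate]
  | cons a rest ih =>
      by_cases ha : a = ""
      · subst ha
        simpa [List.dropWhile] using ih
      · have h1 : ("" : String) ++ a = a := by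
          apply String.toList_inj.mp; simp
        simp only [List.foldl_cons, if_neg (by simp : ¬ ("" : String) ≠ ""), h1,
          List.dropWhile_cons, show (a == "") = false by simpa using ha]
        simp only [Bool.false_eq_true, if_false]
        rw [pvFoldNonempty rest a ha, ← pvJoinCons]

-- ===== VERDICT (by name: the statement is the Claim_ definition above) =====
theorem trim_redundant_spaces_spec : Claim_equal_trim_redundant_spaces := by
  intro input split_char _ _
  unfold Spec_trim_redundant_spaces trim_redundant_spaces trim_redundant_spaces_alt
  exact pvMain _
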